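-- pv_equiv track=rewrite | github.com/christianreimer/treescore | treescore/judge/utils.py | get_color_range
-- ===== SOURCE A (Python) =====
-- def get_color_range(img):
--     """Return lower and upper bound GBR color ranges from the supplied image"""
--     lower = {'g': 255, 'b': 255, 'r': 255}
--     upper = {'g': 0, 'b': 0, 'r': 0}
--     color_index = ['g', 'b', 'r']
--
--     for row in img:
--         for col in row:
--             for i in range(3):
--                 name = color_index[i]
--                 lower[name] = min(col[i], lower[name])
--                 upper[name] = max(col[i], upper[name])
--     upper_range = (upper['g'], upper['b'], upper['r'])
--     lower_range = (lower['g'], lower['b'], lower['r'])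
--     return lower_range, upper_range
-- ===== SOURCE B (Python) =====
-- def get_color_range(img):
--     """Return lower and upper bound GBR color ranges from the supplied image"""
--     pixels = [col for row in img for col in row]
--     lower_range = tuple(min([255] + [p[i] for p in pixels]) for i in range(3))
--     upper_range = tuple(max([0] + [p[i] for p in pixels]) for i in range(3))
--     return lower_range, upper_range
-- ===== Notes on version B (the rewrite author's own statement) =====
-- stated objective: alternative
-- what changed: B replaces A's fused running min/max dict update per pixel with a two-phase gather-then-reduce: flatten all pixels once, then compute each channel bound as a single seeded min/max reduction over that channel's values.
import Mathlib
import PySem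

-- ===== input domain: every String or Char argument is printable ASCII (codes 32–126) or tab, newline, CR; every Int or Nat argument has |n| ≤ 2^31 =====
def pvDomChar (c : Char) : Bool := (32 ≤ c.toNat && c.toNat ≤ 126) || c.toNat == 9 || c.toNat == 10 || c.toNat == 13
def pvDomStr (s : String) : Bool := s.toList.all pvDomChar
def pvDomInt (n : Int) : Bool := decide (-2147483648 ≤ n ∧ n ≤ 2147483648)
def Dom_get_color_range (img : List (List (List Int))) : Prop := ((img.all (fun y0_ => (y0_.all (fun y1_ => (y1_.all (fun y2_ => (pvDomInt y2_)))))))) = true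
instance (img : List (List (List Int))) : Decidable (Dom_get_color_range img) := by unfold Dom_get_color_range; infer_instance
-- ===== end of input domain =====

-- B gathers all pixels once, then reduces each channel with a seeded min/max; A keeps running
-- min/max dicts updated per pixel. Equal return values; neither mutates its argument.

-- ===== PORT A =====
-- the two dict literals {'g':v,'b':v,'r':v}
def pvMkD (g b r : Int) : PySem.Dict String Int := PySem.Dict.mk [("g", g), ("b", b), ("r", r)]

-- the per-pixel inner loop 'for i in range(3): …' updating the two dicts
def pvStepA (st : PySem.Dict String Int × PySem.Dict String Int) (col : List Int) :
    PySem.Dict String Int × PySem.Dict String Int :=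
  (PySem.List.pyRange 0 3 1).foldl (fun st i =>
    let name := PySem.List.pyGetD ["g", "b", "r"] i ""
    (st.1.insert name (min (PySem.List.pyGetD col i 0) (st.1.getD name 0)),
     st.2.insert name (max (PySem.List.pyGetD col i 0) (st.2.getD name 0)))) st

def get_color_range (img : List (List (List Int))) : (Int × Int × Int) × (Int × Int × Int) :=
  let st := img.foldl (fun st row => row.foldl pvStepA st) (pvMkD 255 255 255, pvMkD 0 0 0)
  let upper_range := (st.2.getD "g" 0, st.2.getD "b" 0, st.2.getD "r" 0)
  let lower_range := (st.1.getD "g" 0, st.1.getD "b" 0, st.1.getD "r" 0)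
  (lower_range, upper_range)

-- ===== PORT B =====
-- min([seed] + [p[i] for p in pixels]) / max([seed] + …)
def pvChanLo (pixels : List (List Int)) (i : Int) : Int :=
  (pixels.map (fun p => PySem.List.pyGetD p i 0)).foldl min 255

def pvChanHi (pixels : List (List Int)) (i : Int) : Int :=
  (pixels.map (fun p => PySem.List.pyGetD p i 0)).foldl max 0

def get_color_range_alt (img : List (List (List Int))) : (Int × Int × Int) × (Int × Int × Int) :=
  let pixels := img.flatMap (fun row => row)
  ((pvChanLo pixels 0, pvChanLo pixels 1, pvChanLo pixels 2),
   (pvChanHi pixels 0, pvChanHi pixels 1, pvChanHi pixels 2))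

-- ===== PRECONDITION & SPEC =====
-- Pre_ excludes only images containing a pixel with fewer than 3 components: there the Python A
-- (and B alike) raises IndexError.
def Pre_get_color_range (img : List (List (List Int))) : Prop :=
  ∀ row ∈ img, ∀ col ∈ row, 3 ≤ col.length
instance (img : List (List (List Int))) : Decidable (Pre_get_color_range img) := by
  unfold Pre_get_color_range; infer_instance

def pvWitness_get_color_range : List (List (List Int)) := [[[10, 20, 30], [5, 200, 7]]]

def Spec_get_color_range (img : List (List (List Int))) (out : (Int × Int × Int) × (Int × Int × Int)) : Prop := out = get_color_range_alt img
instance (img : List (List (List Int))) (out : (Int × Int × Int) × (Int × Int × Int)) : Decidable (Spec_get_color_range img out) := by unfold Spec_get_color_range; infer_instance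

-- ===== CLAIM (what is proved, stated in full; the proofs are below) =====
def Claim_equal_get_color_range : Prop := ∀ (img : List (List (List Int))), Dom_get_color_range img → Pre_get_color_range img → Spec_get_color_range img (get_color_range img)

-- ===== LEMMAS AND PROOFS =====

lemma pvStepA_eq (lg lb lr ug ub ur : Int) (col : List Int) :
    pvStepA (pvMkD lg lb lr, pvMkD ug ub ur) col =
      (pvMkD (min (PySem.List.pyGetD col 0 0) lg) (min (PySem.List.pyGetD col 1 0) lb)
             (min (PySem.List.pyGetD col 2 0) lr),
       pvMkD (max (PySem.List.pyGetD col 0 0) ug) (max (PySem.List.pyGetD col 1 0) ub)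
             (max (PySem.List.pyGetD col 2 0) ur)) := by
  rfl

-- loop invariant over the flat pixel list
lemma pvFoldA_eq (pixels : List (List Int)) (lg lb lr ug ub ur : Int) :
    pixels.foldl pvStepA (pvMkD lg lb lr, pvMkD ug ub ur) =
      (pvMkD ((pixels.map (fun p => PySem.List.pyGetD p 0 0)).foldl min lg)
             ((pixels.map (fun p => PySem.List.pyGetD p 1 0)).foldl min lb)
             ((pixels.map (fun p => PySem.List.pyGetD p 2 0)).foldl min lr),
       pvMkD ((pixels.map (fun p => PySem.List.pyGetD p 0 0)).foldl max ug)
             ((pixels.map (fun p => PySem.List.pyGetD p 1 0)).foldl max ub)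
             ((pixels.map (fun p => PySem.List.pyGetD p 2 0)).foldl max ur)) := by
  induction pixels generalizing lg lb lr ug ub ur with
  | nil => rfl
  | cons c cs ih =>
      simp only [List.foldl_cons, List.map_cons, pvStepA_eq, ih]
      simp [min_comm, max_comm]

-- A's nested row/col fold equals the fold over the flattened pixel list
lemma pvFold_flat (img : List (List (List Int)))
    (st : PySem.Dict String Int × PySem.Dict String Int) :
    img.foldl (fun st row => row.foldl pvStepA st) st =
      (img.flatMap (fun row => row)).foldl pvStepA st := by
  induction img generalizing st with
  | nil => rfl
  | cons r rs ih => simp [List.foldl_cons, ih, List.foldl_append]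

theorem get_color_range_spec : Claim_equal_get_color_range := by
  intro img _ _
  unfold Spec_get_color_range get_color_range get_color_range_alt
  rw [pvFold_flat, pvFoldA_eq]
  rfl
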